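-- pv_equiv track=rewrite | github.com/GRusar/project2_gusar_dpo-nod | src/primitive_db/parser.py | _split_assignments
-- ===== SOURCE A (Python) =====
-- def _split_assignments(segment: str) -> list[str]:
--     """Выделяет пары присваиваний из блока SET."""
--     assignments: list[str] = []
--     current: list[str] = []
--     saw_equal = False
--
--     index = 0
--     length = len(segment)
--     while index < length:
--         char = segment[index]
--
--         if char == "=":
--             saw_equal = True
--             current.append(char)
--             index += 1
--             continue
--
--         if char == "," and saw_equal:
--             remainder = segment[index + 1 :]
--             remainder_stripped = remainder.lstrip()
--             if remainder_stripped: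
--                 token_end = 0
--                 while (
--                     token_end < len(remainder_stripped)
--                     and (
--                         remainder_stripped[token_end].isalnum()
--                         or remainder_stripped[token_end] == "_"
--                     )
--                 ):
--                     token_end += 1
--                 if token_end:
--                     rest = remainder_stripped[token_end:].lstrip()
--                     if rest.startswith("="):
--                         assignment = "".join(current).strip()
--                         if assignment:
--                             assignments.append(assignment)
--                         current = []
--                         saw_equal = False
--                         index += 1
--                         continue
--
--         current.append(char)
--         index += 1
--
--     tail = "".join(current).strip()
--     if tail:
--         assignments.append(tail)
--     return assignments
-- ===== SOURCE B (Python) =====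
-- def _split_assignments(segment: str) -> list[str]:
--     """Splits the SET block into assignment pieces by cutting at each splitting
--     comma found by an index-based forward scan (no per-comma substring copies)."""
--     assignments = []
--     start = 0
--     while True:
--         cut = _find_cut(segment, start)
--         if cut is None:
--             break
--         piece = segment[start:cut].strip()
--         if piece:
--             assignments.append(piece)
--         start = cut + 1
--     tail = segment[start:].strip()
--     if tail:
--         assignments.append(tail)
--     return assignments
--
--
-- def _find_cut(s, start):
--     """Index of the first splitting comma at or after `start`, or None."""
--     saw_equal = False
--     for i in range(start, len(s)):
--         ch = s[i]
--         if ch == "=":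
--             saw_equal = True
--         elif ch == "," and saw_equal and _followed_by_assignment(s, i + 1):
--             return i
--     return None
--
--
-- def _followed_by_assignment(s, j):
--     """True iff s[j:] is whitespace*, a nonempty [A-Za-z0-9_]+ token, whitespace*, '='."""
--     n = len(s)
--     while j < n and s[j].isspace():
--         j += 1
--     k = j
--     while k < n and (s[k].isalnum() or s[k] == "_"):
--         k += 1
--     if k == j:
--         return False
--     while k < n and s[k].isspace():
--         k += 1
--     return k < n and s[k] == "="
-- ===== Notes on version B (the rewrite author's own statement) =====
-- stated objective: faster
-- what changed: Instead of accumulating the current assignment character by character and slicing+lstripping the whole remainder at every candidate comma, B scans forward with indices for the next splitting comma (bounded lookahead, no per-comma substring copies) and cuts the string once per assignment.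
import Mathlib
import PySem

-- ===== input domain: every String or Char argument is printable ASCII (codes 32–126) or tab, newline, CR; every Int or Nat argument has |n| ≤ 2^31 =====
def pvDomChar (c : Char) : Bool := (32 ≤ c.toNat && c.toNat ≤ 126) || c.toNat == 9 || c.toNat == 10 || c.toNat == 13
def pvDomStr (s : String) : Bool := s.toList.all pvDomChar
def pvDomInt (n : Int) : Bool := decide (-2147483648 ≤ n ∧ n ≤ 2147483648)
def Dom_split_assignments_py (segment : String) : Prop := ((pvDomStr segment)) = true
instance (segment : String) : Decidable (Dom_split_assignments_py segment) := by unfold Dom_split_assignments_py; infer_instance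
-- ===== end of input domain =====

-- B replaces A's per-comma remainder slicing by a single index-based forward scan
-- that cuts the string once per assignment (objective: faster).

-- ===== PORT A =====
-- A: char-by-char state machine accumulating `current`; at ',' after '=' it
-- slices the remainder, lstrips it and checks for "identifier token then '='".
-- The index-based while loops are transliterated as structural recursion over
-- the character list (the slice segment[index+1:] is the list tail `rest`).

-- A's inner counting loop `while token_end < len(..) and (isalnum or '_')`
def pvTokEndA : List Char → Nat
  | [] => 0
  | c :: cs => if PySem.Chars.isalnum c || c = '_' then pvTokEndA cs + 1 else 0

def pvGoA : List Char → List Char → Bool → List String → List String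
  | [], current, _, acc =>
      let tail := PySem.Chars.strip current
      if tail ≠ [] then acc ++ [String.ofList tail] else acc
  | c :: rest, current, saw, acc =>
      if c = '=' then pvGoA rest (current ++ [c]) true acc
      else if c = ',' ∧ saw = true then
        let rs := PySem.Chars.lstrip rest                     -- remainder_stripped
        if rs ≠ [] then
          let tokenEnd := pvTokEndA rs
          if tokenEnd ≠ 0 then
            if PySem.Chars.startswith (PySem.Chars.lstrip (rs.drop tokenEnd)) ['='] then
              let a := PySem.Chars.strip current
              pvGoA rest [] false (if a ≠ [] then acc ++ [String.ofList a] else acc)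
            else pvGoA rest (current ++ [c]) saw acc
          else pvGoA rest (current ++ [c]) saw acc
        else pvGoA rest (current ++ [c]) saw acc
      else pvGoA rest (current ++ [c]) saw acc

def split_assignments_py (segment : String) : List String :=
  pvGoA segment.toList [] false []

-- ===== PORT B =====
-- B: scan forward for the next splitting comma, cut there, repeat on the rest.
-- Each python while loop over an index j is transliterated as dropWhile on the
-- suffix s[j:] of the character list.

def pvFollowedB (s : List Char) : Bool :=
  let afterWs := s.dropWhile PySem.Chars.isspace             -- advance j over whitespace
  let afterTok := afterWs.dropWhile (fun c => PySem.Chars.isalnum c || c = '_')  -- advance k over token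
  if afterTok.length = afterWs.length then false             -- k == j: no token
  else
    match afterTok.dropWhile PySem.Chars.isspace with        -- advance k over whitespace
    | c :: _ => c = '='                                      -- k < n and s[k] == '='
    | [] => false

def pvFindCutB : List Char → Bool → Option Nat
  | [], _ => none
  | c :: rest, saw =>
      if c = '=' then (pvFindCutB rest true).map (· + 1)
      else if c = ',' ∧ saw = true then
        if pvFollowedB rest then some 0 else (pvFindCutB rest saw).map (· + 1)
      else (pvFindCutB rest saw).map (· + 1)

-- needed by pvGoB's termination
theorem pvFindCutB_lt : ∀ (s : List Char) (saw : Bool) (cut : Nat),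
    pvFindCutB s saw = some cut → cut < s.length := by
  intro s
  induction s with
  | nil => intro saw cut h; simp [pvFindCutB] at h
  | cons c rest ih =>
    intro saw cut h
    simp only [pvFindCutB] at h
    split_ifs at h with h1 h2 h3
    · obtain ⟨k, hk, rfl⟩ := Option.map_eq_some_iff.mp h
      have hlt := ih _ _ hk
      simp only [List.length_cons]; omega
    · cases h; simp
    · obtain ⟨k, hk, rfl⟩ := Option.map_eq_some_iff.mp h
      have hlt := ih _ _ hk
      simp only [List.length_cons]; omega
    · obtain ⟨k, hk, rfl⟩ := Option.map_eq_some_iff.mp h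
      have hlt := ih _ _ hk
      simp only [List.length_cons]; omega

def pvGoB (s : List Char) (acc : List String) : List String :=
  match _h : pvFindCutB s false with
  | some cut =>
      let piece := PySem.Chars.strip (s.take cut)
      pvGoB (s.drop (cut + 1)) (if piece ≠ [] then acc ++ [String.ofList piece] else acc)
  | none =>
      let tail := PySem.Chars.strip s
      if tail ≠ [] then acc ++ [String.ofList tail] else acc
termination_by s.length
decreasing_by
  have := pvFindCutB_lt s false cut _h
  simp only [List.length_drop]
  omega

def split_assignments_py_alt (segment : String) : List String :=
  pvGoB segment.toList []

-- ===== PRECONDITION & SPEC =====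
def Spec_split_assignments_py (segment : String) (out : List String) : Prop := out = split_assignments_py_alt segment
instance (segment : String) (out : List String) : Decidable (Spec_split_assignments_py segment out) := by unfold Spec_split_assignments_py; infer_instance

-- ===== CLAIM (what is proved, stated in full; the proofs are below) =====
def Claim_equal_split_assignments_py : Prop := ∀ (segment : String), Dom_split_assignments_py segment → Spec_split_assignments_py segment (split_assignments_py segment)

-- ===== LEMMAS AND PROOFS =====

theorem pvTokEndA_eq_length_takeWhile (rs : List Char) :
    pvTokEndA rs = (rs.takeWhile (fun c => PySem.Chars.isalnum c || c = '_')).length := by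
  induction rs with
  | nil => rfl
  | cons c cs ih =>
    simp only [pvTokEndA, List.takeWhile]
    by_cases h : (PySem.Chars.isalnum c || decide (c = '_')) = true <;> simp [h, ih]

-- B's splitting-comma test agrees with A's lstrip/token/startswith test on the same suffix
theorem pvFollowed_iff (s : List Char) :
    pvFollowedB s = true ↔
      (PySem.Chars.lstrip s ≠ [] ∧ pvTokEndA (PySem.Chars.lstrip s) ≠ 0 ∧
       PySem.Chars.startswith
         (PySem.Chars.lstrip ((PySem.Chars.lstrip s).drop (pvTokEndA (PySem.Chars.lstrip s)))) ['='] = true) := by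
  simp only [pvFollowedB, PySem.Chars.lstrip]
  rw [pvTokEndA_eq_length_takeWhile]
  generalize (s.dropWhile PySem.Chars.isspace) = t
  set a := t.takeWhile (fun c => PySem.Chars.isalnum c || c = '_') with ha
  set b := t.dropWhile (fun c => PySem.Chars.isalnum c || c = '_') with hb
  have hsplit : a ++ b = t := List.takeWhile_append_dropWhile
  have hlen : a.length + b.length = t.length := by rw [← List.length_append, hsplit]
  have hdropb : t.drop a.length = b := by rw [← hsplit]; exact List.drop_left
  rw [hdropb]
  by_cases h0 : b.length = t.length
  · rw [if_pos h0]
    have ha0 : a.length = 0 := by omega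
    simp [ha0]
  · rw [if_neg h0]
    have ha0 : a.length ≠ 0 := by omega
    have ht0 : t.length ≠ 0 := by omega
    have hne : t ≠ [] := by
      intro hnil
      rw [hnil] at ht0
      simp at ht0
    rcases hm : b.dropWhile PySem.Chars.isspace with _ | ⟨d, ds⟩
    · simp [hne, ha0, PySem.Chars.startswith, List.isPrefixOf]
    · by_cases hd : d = '='
      · subst hd
        simp [hne, ha0, PySem.Chars.startswith, List.isPrefixOf]
      · simp [hne, ha0, PySem.Chars.startswith, List.isPrefixOf, hd, Ne.symm hd]

-- scan of A's prefix `current`: the final saw_equal flag, or none if a split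
-- would already occur inside the prefix (lookaheads read into `rest`)
def pvScan : List Char → Bool → List Char → Option Bool
  | [], saw, _ => some saw
  | c :: cs, saw, rest =>
      if c = '=' then pvScan cs true rest
      else if c = ',' ∧ saw = true then
        if pvFollowedB (cs ++ rest) then none else pvScan cs saw rest
      else pvScan cs saw rest

theorem pvScan_append : ∀ (p q : List Char) (s0 : Bool) (rest : List Char),
    pvScan (p ++ q) s0 rest = (pvScan p s0 (q ++ rest)).bind (fun s => pvScan q s rest) := by
  intro p
  induction p with
  | nil => intro q s0 rest; simp [pvScan]
  | cons d ds ih =>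
    intro q s0 rest
    simp only [List.cons_append, pvScan]
    by_cases h1 : d = '='
    · simp only [if_pos h1]; exact ih ..
    · simp only [if_neg h1]
      by_cases h2 : d = ',' ∧ s0 = true
      · simp only [if_pos h2, List.append_assoc]
        by_cases h3 : pvFollowedB (ds ++ (q ++ rest)) = true
        · simp [h3]
        · simp only [Bool.not_eq_true] at h3
          simp only [h3, Bool.false_eq_true, if_false]
          exact ih ..
      · simp only [if_neg h2]; exact ih ..

theorem pvMapSucc (o : Option Nat) (n : Nat) :
    (o.map (n + ·)).map (· + 1) = o.map ((n + 1) + ·) := by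
  cases o with
  | none => rfl
  | some k => simp; omega

theorem pvFindCut_decomp : ∀ (p : List Char) (s0 s : Bool) (rest : List Char),
    pvScan p s0 rest = some s →
    pvFindCutB (p ++ rest) s0 = (pvFindCutB rest s).map (p.length + ·) := by
  intro p
  induction p with
  | nil =>
    intro s0 s rest h
    simp only [pvScan] at h
    cases h
    simp only [List.nil_append, List.length_nil]
    cases pvFindCutB rest s0 <;> simp
  | cons c cs ih =>
    intro s0 s rest h
    simp only [pvScan] at h
    simp only [List.cons_append, pvFindCutB, List.length_cons]
    by_cases h1 : c = '='
    · rw [if_pos h1] at h ⊢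
      rw [ih _ _ _ h, pvMapSucc]
    · rw [if_neg h1] at h ⊢
      by_cases h2 : c = ',' ∧ s0 = true
      · rw [if_pos h2] at h ⊢
        by_cases h3 : pvFollowedB (cs ++ rest) = true
        · rw [if_pos h3] at h; cases h
        · rw [if_neg h3] at h ⊢
          rw [ih _ _ _ h, pvMapSucc]
      · rw [if_neg h2] at h ⊢
        rw [ih _ _ _ h, pvMapSucc]

theorem pvGoB_cut (s : List Char) (acc : List String) (cut : Nat)
    (h : pvFindCutB s false = some cut) :
    pvGoB s acc = pvGoB (s.drop (cut + 1))
      (if PySem.Chars.strip (s.take cut) ≠ [] then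
        acc ++ [String.ofList (PySem.Chars.strip (s.take cut))] else acc) := by
  rw [pvGoB.eq_def]
  split
  · next cut' heq => rw [h] at heq; injection heq with e; subst e; rfl
  · next heq => rw [h] at heq; cases heq

theorem pvGoB_none (s : List Char) (acc : List String)
    (h : pvFindCutB s false = none) :
    pvGoB s acc =
      (if PySem.Chars.strip s ≠ [] then acc ++ [String.ofList (PySem.Chars.strip s)] else acc) := by
  rw [pvGoB.eq_def]
  split
  · next cut heq => rw [h] at heq; cases heq
  · next heq => rfl

theorem pvMain : ∀ (rest current : List Char) (saw : Bool) (acc : List String),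
    pvScan current false rest = some saw →
    pvGoA rest current saw acc = pvGoB (current ++ rest) acc := by
  intro rest
  induction rest with
  | nil =>
    intro current saw acc h
    have hfc : pvFindCutB (current ++ []) false = none := by
      rw [pvFindCut_decomp current false saw [] h]; rfl
    rw [pvGoB_none _ _ hfc]
    simp [pvGoA]
  | cons c rest' ih =>
    intro current saw acc h
    by_cases hc : c = '='
    · subst hc
      have hs : pvScan (current ++ ['=']) false rest' = some true := by
        rw [pvScan_append current ['='] false rest', List.singleton_append, h]
        rfl
      rw [show pvGoA ('=' :: rest') current saw acc = pvGoA rest' (current ++ ['=']) true acc by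
            simp [pvGoA]]
      rw [ih _ _ _ hs, List.append_assoc]
      rfl
    · by_cases hcs : c = ',' ∧ saw = true
      · obtain ⟨rfl, hsaw⟩ := hcs
        subst hsaw
        by_cases hf : pvFollowedB rest' = true
        · -- splitting comma
          obtain ⟨h1, h2, h3⟩ := (pvFollowed_iff rest').mp hf
          have hfc : pvFindCutB (current ++ ',' :: rest') false = some current.length := by
            rw [pvFindCut_decomp current false true (',' :: rest') h]
            simp only [pvFindCutB]
            rw [if_neg (by decide), if_pos (by simp), if_pos hf]
            simp
          have hA : pvGoA (',' :: rest') current true acc =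
              pvGoA rest' [] false
                (if PySem.Chars.strip current ≠ [] then
                  acc ++ [String.ofList (PySem.Chars.strip current)] else acc) := by
            simp only [pvGoA]
            rw [if_neg (by decide), if_pos (by simp), if_pos h1, if_pos h2, if_pos h3]
          rw [hA]
          rw [pvGoB_cut _ _ _ hfc]
          have htake : (current ++ ',' :: rest').take current.length = current :=
            List.take_left
          have hdrop : (current ++ ',' :: rest').drop (current.length + 1) = rest' := by
            rw [show current ++ ',' :: rest' = (current ++ [',']) ++ rest' by simp,
                show current.length + 1 = (current ++ [',']).length by simp]
            exact List.drop_left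
          rw [htake, hdrop]
          exact ih [] false _ rfl
        · -- non-splitting comma: the lookahead fails, A appends the comma
          have hs : pvScan (current ++ [',']) false rest' = some true := by
            rw [pvScan_append current [','] false rest', List.singleton_append, h]
            simp only [Option.bind, pvScan, List.nil_append]
            rw [if_neg (by decide), if_pos (by simp),
                if_neg (by simpa using hf)]
          have hA : pvGoA (',' :: rest') current true acc =
              pvGoA rest' (current ++ [',']) true acc := by
            simp only [pvGoA]
            rw [if_neg (by decide), if_pos (by simp)]
            by_cases g1 : PySem.Chars.lstrip rest' ≠ []
            · rw [if_pos g1]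
              by_cases g2 : pvTokEndA (PySem.Chars.lstrip rest') ≠ 0
              · rw [if_pos g2]
                have g3 : ¬ PySem.Chars.startswith
                    (PySem.Chars.lstrip ((PySem.Chars.lstrip rest').drop
                      (pvTokEndA (PySem.Chars.lstrip rest')))) ['='] = true := by
                  intro g3
                  exact hf ((pvFollowed_iff rest').mpr ⟨g1, g2, g3⟩)
                rw [if_neg g3]
              · rw [if_neg g2]
            · rw [if_neg g1]
          rw [hA, ih _ _ _ hs, List.append_assoc]
          rfl
      · -- ordinary character
        have hs : pvScan (current ++ [c]) false rest' = some saw := by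
          rw [pvScan_append current [c] false rest', List.singleton_append, h]
          simp only [Option.bind, pvScan, List.nil_append]
          rw [if_neg hc, if_neg hcs]
        have hA : pvGoA (c :: rest') current saw acc = pvGoA rest' (current ++ [c]) saw acc := by
          simp only [pvGoA]
          rw [if_neg hc, if_neg hcs]
        rw [hA, ih _ _ _ hs, List.append_assoc]
        rfl

-- ===== VERDICT (by name: the statement is the Claim_ definition above) =====
theorem split_assignments_py_spec : Claim_equal_split_assignments_py := by
  intro segment _
  unfold Spec_split_assignments_py split_assignments_py split_assignments_py_alt
  have hmain := pvMain segment.toList [] false [] rfl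
  simpa using hmain
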